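-- pv_equiv track=rewrite | github.com/Revi1337/BaekJoon-Coding-Test | 백준/Silver/1439. 뒤집기/뒤집기.py | solution
-- ===== SOURCE A (Python) =====
-- def solution(S):
--     counter = [0, 0]
--     flag0 = flag1 = False
--     for ch in S:
--         if ch == '0':
--             flag1 = False
--             if not flag0:
--                 counter[0] += 1
--                 flag0 = True
--         else:
--             flag0 = False
--             if not flag1:
--                 counter[1] += 1
--                 flag1 = True
--
--     return min(counter)
-- ===== SOURCE B (Python) =====
-- def solution(S):
--     if not S:
--         return 0
--     z = [c == '0' for c in S]
--     boundaries = sum(1 for a, b in zip(z, z[1:]) if a != b)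
--     return (boundaries + 1) // 2
-- ===== Notes on version B (the rewrite author's own statement) =====
-- stated objective: alternative
-- what changed: Replaces the stateful two-counter/two-flag run scan by counting run boundaries with a pairwise zip and returning (boundaries+1)//2, using that the two run types alternate so the smaller run count is floor(total_runs/2).
import Mathlib
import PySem

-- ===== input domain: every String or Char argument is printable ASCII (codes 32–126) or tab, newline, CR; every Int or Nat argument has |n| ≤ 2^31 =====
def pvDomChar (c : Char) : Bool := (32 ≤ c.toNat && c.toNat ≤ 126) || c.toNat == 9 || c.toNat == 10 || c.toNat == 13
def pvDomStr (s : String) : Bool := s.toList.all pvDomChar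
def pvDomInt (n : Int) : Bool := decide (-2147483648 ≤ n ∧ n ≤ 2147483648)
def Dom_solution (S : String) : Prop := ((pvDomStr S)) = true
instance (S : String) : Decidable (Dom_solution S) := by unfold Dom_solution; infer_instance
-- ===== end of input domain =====

-- B counts run boundaries with a pairwise zip and returns (boundaries+1)//2 instead of
-- maintaining the two run counters and two flags of A (alternative, same cost).

-- ===== PORT A =====
-- state = (counter[0], counter[1], flag0, flag1)
def solutionStep (st : Int × Int × Bool × Bool) (ch : Char) : Int × Int × Bool × Bool :=
  let (c0, c1, f0, _f1) := st
  if ch == '0' then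
    -- flag1 = False; if not flag0: counter[0] += 1; flag0 = True
    if !f0 then (c0 + 1, c1, true, false) else (c0, c1, f0, false)
  else
    -- flag0 = False; if not flag1: counter[1] += 1; flag1 = True
    if !_f1 then (c0, c1 + 1, false, true) else (c0, c1, false, _f1)

def solution (S : String) : Int :=
  let st := S.toList.foldl solutionStep (0, 0, false, false)
  min st.1 st.2.1

-- ===== PORT B =====
def solution_alt (S : String) : Int :=
  if S.toList = [] then 0
  else
    let z := S.toList.map (fun c => c == '0')
    let boundaries : Int := ((z.zip z.tail).countP (fun p => p.1 ≠ p.2) : Nat)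
    PySem.Int.floordiv (boundaries + 1) 2

-- ===== PRECONDITION & SPEC =====
def Spec_solution (S : String) (out : Int) : Prop := out = solution_alt S
instance (S : String) (out : Int) : Decidable (Spec_solution S out) := by unfold Spec_solution; infer_instance

-- ===== CLAIM (what is proved, stated in full; the proofs are below) =====
def Claim_equal_solution : Prop := ∀ (S : String), Dom_solution S → Spec_solution S (solution S)

-- ===== LEMMAS AND PROOFS =====

-- The step of A seen on the boolean (ch == '0')
def boolStep (st : Int × Int × Bool × Bool) (b : Bool) : Int × Int × Bool × Bool :=
  let (c0, c1, f0, _f1) := st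
  if b then
    if !f0 then (c0 + 1, c1, true, false) else (c0, c1, f0, false)
  else
    if !_f1 then (c0, c1 + 1, false, true) else (c0, c1, false, _f1)

lemma solutionStep_eq_boolStep (st : Int × Int × Bool × Bool) (ch : Char) :
    solutionStep st ch = boolStep st (ch == '0') := rfl

lemma foldl_solutionStep (l : List Char) (st : Int × Int × Bool × Bool) :
    l.foldl solutionStep st = (l.map (fun c => c == '0')).foldl boolStep st := by
  induction l generalizing st with
  | nil => rfl
  | cons c t ih => simp [List.foldl, solutionStep_eq_boolStep, ih]

-- boundaries seen from an explicit previous element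
def bdyFrom (b : Bool) : List Bool → Nat
  | [] => 0
  | x :: xs => (if x = b then 0 else 1) + bdyFrom x xs

lemma countP_zip_eq_bdyFrom (b : Bool) (l : List Bool) :
    ((b :: l).zip l).countP (fun p => p.1 ≠ p.2) = bdyFrom b l := by
  induction l generalizing b with
  | nil => rfl
  | cons x xs ih =>
    simp only [List.zip_cons_cons, List.countP_cons, bdyFrom, ih x]
    by_cases h : x = b <;> simp [h, eq_comm, Nat.add_comm]

-- the run counters stay within 1 of each other, the larger one being the type of the last run
def runInv (b : Bool) (c0 c1 : Int) : Prop :=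
  0 ≤ c1 ∧ (c0 = c1 ∨ (b = true ∧ c0 = c1 + 1) ∨ (b = false ∧ c1 = c0 + 1))

lemma foldl_boolStep_inv (l : List Bool) :
    ∀ (b : Bool) (c0 c1 : Int), runInv b c0 c1 →
      ∃ c0' c1' b', l.foldl boolStep (c0, c1, b, !b) = (c0', c1', b', !b') ∧
        runInv b' c0' c1' ∧ c0' + c1' = c0 + c1 + (bdyFrom b l : Int) := by
  induction l with
  | nil => exact fun b c0 c1 h => ⟨c0, c1, b, rfl, h, by simp [bdyFrom]⟩
  | cons x xs ih =>
    intro b c0 c1 h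
    cases x <;> cases b
    · -- x = false, last = false: no change
      have := ih false c0 c1 h
      simpa [List.foldl, boolStep, bdyFrom] using this
    · -- x = false, last = true: counter[1] += 1
      obtain ⟨hc1, hcs⟩ := h
      have hinv : runInv false c0 (c1 + 1) := by
        refine ⟨by omega, ?_⟩
        rcases hcs with h | ⟨_, h⟩ | ⟨hb, _⟩
        · right; right; exact ⟨rfl, by omega⟩
        · left; omega
        · exact absurd hb (by simp)
      obtain ⟨c0', c1', b', heq, hinv', hsum⟩ := ih false c0 (c1 + 1) hinv
      exact ⟨c0', c1', b', by simpa [List.foldl, boolStep] using heq, hinv',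
        by simp [bdyFrom] at hsum ⊢; omega⟩
    · -- x = true, last = false: counter[0] += 1
      obtain ⟨hc1, hcs⟩ := h
      have hinv : runInv true (c0 + 1) c1 := by
        refine ⟨hc1, ?_⟩
        rcases hcs with h | ⟨hb, _⟩ | ⟨_, h⟩
        · right; left; exact ⟨rfl, by omega⟩
        · exact absurd hb (by simp)
        · left; omega
      obtain ⟨c0', c1', b', heq, hinv', hsum⟩ := ih true (c0 + 1) c1 hinv
      exact ⟨c0', c1', b', by simpa [List.foldl, boolStep] using heq, hinv',
        by simp [bdyFrom] at hsum ⊢; omega⟩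
    · -- x = true, last = true: no change
      have := ih true c0 c1 h
      simpa [List.foldl, boolStep, bdyFrom] using this

lemma min_of_runInv (b : Bool) (c0 c1 : Int) (h : runInv b c0 c1) :
    min c0 c1 = (c0 + c1) / 2 := by
  obtain ⟨hc1, h | ⟨_, h⟩ | ⟨_, h⟩⟩ := h <;> omega

theorem solution_eq_alt (S : String) : solution S = solution_alt S := by
  unfold solution solution_alt
  rw [foldl_solutionStep]
  cases hl : S.toList with
  | nil => simp
  | cons c t =>
    simp only [List.map_cons, if_neg (List.cons_ne_nil _ _), List.tail_cons]
    set b0 := (c == '0') with hb0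
    set zt := t.map (fun c => c == '0') with hzt
    have hfirst : boolStep (0, 0, false, false) b0 = ((if b0 then (1:Int) else 0), (if b0 then (0:Int) else 1), b0, !b0) := by
      cases b0 <;> rfl
    have hinv : runInv b0 (if b0 then (1:Int) else 0) (if b0 then (0:Int) else 1) := by
      cases b0 <;> simp [runInv]
    obtain ⟨c0', c1', b', heq, hinv', hsum⟩ :=
      foldl_boolStep_inv zt b0 _ _ hinv
    rw [List.foldl_cons, hfirst, heq]
    have hcnt : ((b0 :: zt).zip zt).countP (fun p => p.1 ≠ p.2) = bdyFrom b0 zt :=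
      countP_zip_eq_bdyFrom b0 zt
    rw [hcnt, min_of_runInv b' c0' c1' hinv',
      PySem.Int.floordiv_eq_ediv_of_pos (by omega)]
    have hs : c0' + c1' = 1 + (bdyFrom b0 zt : Int) := by
      rcases Bool.eq_false_or_eq_true b0 with hb | hb <;> rw [hb] at hsum ⊢ <;> simpa using hsum
    omega

-- ===== VERDICT (by name: the statement is the Claim_ definition above) =====
theorem solution_spec : Claim_equal_solution := fun S _ => solution_eq_alt S
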